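-- pv_equiv track=rewrite | github.com/Hanifahreza/medbib | main/views.py | get_title_content
-- ===== SOURCE A (Python) =====
-- def get_title_content(file, col_id, doc_id):
--     title_ends = False
--     title, content = '', ''
--
--     for line in file:
--         if line[:2] == '  ':
--             title_ends = True
--         if title_ends:
--             content += line.strip()
--         else:
--             title += line.strip()
--
--     if content == '':
--         content = title
--         title = f'Document {doc_id[:-4]} - Collection {col_id}'
--     return title, content
-- ===== SOURCE B (Python) =====
-- def get_title_content(file, col_id, doc_id):
--     lines = list(file)
--     i = next((k for k, l in enumerate(lines) if l[:2] == '  '), len(lines))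
--     title = ''.join(l.strip() for l in lines[:i])
--     content = ''.join(l.strip() for l in lines[i:])
--     if content == '':
--         content = title
--         title = f'Document {doc_id[:-4]} - Collection {col_id}'
--     return title, content
-- ===== Notes on version B (the rewrite author's own statement) =====
-- stated objective: alternative
-- what changed: Replaces the sticky-flag accumulation loop by a boundary search (index of the first line starting with two spaces) followed by two slice-joins of stripped lines.
import Mathlib
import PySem

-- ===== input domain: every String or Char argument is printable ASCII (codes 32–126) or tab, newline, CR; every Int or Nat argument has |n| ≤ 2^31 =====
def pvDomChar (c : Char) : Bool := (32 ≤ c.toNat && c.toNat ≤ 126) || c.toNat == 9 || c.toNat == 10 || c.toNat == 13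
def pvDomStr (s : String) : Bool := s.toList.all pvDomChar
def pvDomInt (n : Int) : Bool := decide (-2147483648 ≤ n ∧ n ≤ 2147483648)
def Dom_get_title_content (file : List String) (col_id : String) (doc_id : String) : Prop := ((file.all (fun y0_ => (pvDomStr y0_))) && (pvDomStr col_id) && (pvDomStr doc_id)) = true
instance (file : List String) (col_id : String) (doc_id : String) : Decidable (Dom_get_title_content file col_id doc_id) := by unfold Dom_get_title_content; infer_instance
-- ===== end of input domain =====

-- B replaces A's sticky-flag single pass by a boundary search plus two slice-joins (alternative decomposition, same cost).

-- ===== PORT A =====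
-- A's loop: sticky flag 'title_ends', string concatenation ported on code points (List Char), result rebuilt with String.ofList.
def get_title_content (file : List String) (col_id : String) (doc_id : String) : String × String :=
  let st := file.foldl (fun (s : Bool × List Char × List Char) line =>
    let title_ends := if PySem.Str.slice line none (some 2) == "  " then true else s.1
    if title_ends then (title_ends, s.2.1, s.2.2 ++ (PySem.Str.strip line).toList)
    else (title_ends, s.2.1 ++ (PySem.Str.strip line).toList, s.2.2)) (false, [], [])
  let title := String.ofList st.2.1
  let content := String.ofList st.2.2
  if content == "" then
    ("Document " ++ PySem.Str.slice doc_id none (some (-4)) ++ " - Collection " ++ col_id, title)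
  else (title, content)

-- ===== PORT B =====
def get_title_content_alt (file : List String) (col_id : String) (doc_id : String) : String × String :=
  let i := file.findIdx (fun l => PySem.Str.slice l none (some 2) == "  ")
  let title := PySem.Str.join "" ((PySem.List.slice file none (some (i : Int))).map PySem.Str.strip)
  let content := PySem.Str.join "" ((PySem.List.slice file (some (i : Int)) none).map PySem.Str.strip)
  if content == "" then
    ("Document " ++ PySem.Str.slice doc_id none (some (-4)) ++ " - Collection " ++ col_id, title)
  else (title, content)

-- ===== PRECONDITION & SPEC =====
def Spec_get_title_content (file : List String) (col_id : String) (doc_id : String) (out : String × String) : Prop := out = get_title_content_alt file col_id doc_id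
instance (file : List String) (col_id : String) (doc_id : String) (out : String × String) : Decidable (Spec_get_title_content file col_id doc_id out) := by unfold Spec_get_title_content; infer_instance

-- ===== CLAIM (what is proved, stated in full; the proofs are below) =====
def Claim_equal_get_title_content : Prop := ∀ (file : List String) (col_id : String) (doc_id : String), Dom_get_title_content file col_id doc_id → Spec_get_title_content file col_id doc_id (get_title_content file col_id doc_id)

-- ===== LEMMAS AND PROOFS =====

-- the marker predicate and A's loop step
def pvP (l : String) : Bool := PySem.Str.slice l none (some 2) == "  "

def pvStep (s : Bool × List Char × List Char) (line : String) : Bool × List Char × List Char :=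
  let title_ends := if PySem.Str.slice line none (some 2) == "  " then true else s.1
  if title_ends then (title_ends, s.2.1, s.2.2 ++ (PySem.Str.strip line).toList)
  else (title_ends, s.2.1 ++ (PySem.Str.strip line).toList, s.2.2)

def pvStrips (ls : List String) : List Char := (ls.map (fun l => (PySem.Str.strip l).toList)).flatten

lemma pvJoin_eq_flatten (parts : List (List Char)) : PySem.Chars.join [] parts = parts.flatten := by
  induction parts with
  | nil => simp [PySem.Chars.join_nil]
  | cons p rest ih =>
    cases rest with
    | nil => simp [PySem.Chars.join_singleton]
    | cons q r => simpa [PySem.Chars.join_cons_cons] using congrArg (p ++ ·) ih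

lemma pvLock (ls : List String) (t c : List Char) :
    ls.foldl pvStep (true, t, c) = (true, t, c ++ pvStrips ls) := by
  induction ls generalizing c with
  | nil => simp [pvStrips]
  | cons l rest ih => simp [pvStep, pvStrips, ih]

lemma pvMain (ls : List String) (t c : List Char) :
    ls.foldl pvStep (false, t, c) =
      (decide (ls.findIdx pvP < ls.length),
       t ++ pvStrips (ls.take (ls.findIdx pvP)),
       c ++ pvStrips (ls.drop (ls.findIdx pvP))) := by
  induction ls generalizing t c with
  | nil => simp [pvStrips]
  | cons l rest ih =>
    by_cases h : pvP l
    · have h' : (PySem.Str.slice l none (some 2) == "  ") = true := h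
      rw [List.foldl_cons,
        show pvStep (false, t, c) l = (true, t, c ++ (PySem.Str.strip l).toList) by
          simp [pvStep, h'],
        pvLock, List.findIdx_cons, h]
      simp [pvStrips]
    · have h' : (PySem.Str.slice l none (some 2) == "  ") = false := by
        simpa [pvP] using h
      have hf : pvP l = false := by simpa [pvP] using h
      rw [List.foldl_cons,
        show pvStep (false, t, c) l = (false, t ++ (PySem.Str.strip l).toList, c) by
          simp [pvStep, h'],
        ih, List.findIdx_cons, hf]
      simp [pvStrips]

lemma pvContent_toList (ls : List String) :
    (PySem.Str.join "" (ls.map PySem.Str.strip)).toList = pvStrips ls := by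
  rw [PySem.Str.toList_join]
  simp only [List.map_map]
  rw [show ("" : String).toList = [] from rfl, pvJoin_eq_flatten]
  simp [pvStrips, Function.comp_def, PySem.Str.toList_strip]

-- ===== VERDICT (by name: the statement is the Claim_ definition above) =====
theorem get_title_content_spec : Claim_equal_get_title_content := by
  intro file col_id doc_id _
  unfold Spec_get_title_content get_title_content get_title_content_alt
  have hfold : file.foldl (fun (s : Bool × List Char × List Char) line =>
      let title_ends := if PySem.Str.slice line none (some 2) == "  " then true else s.1
      if title_ends then (title_ends, s.2.1, s.2.2 ++ (PySem.Str.strip line).toList)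
      else (title_ends, s.2.1 ++ (PySem.Str.strip line).toList, s.2.2)) (false, [], []) =
      file.foldl pvStep (false, [], []) := rfl
  rw [hfold, pvMain]
  set i := file.findIdx pvP with hi
  have hidx : file.findIdx (fun l => PySem.Str.slice l none (some 2) == "  ") = i := rfl
  rw [hidx]
  simp only [PySem.List.slice_to_natCast, PySem.List.slice_from_natCast]
  have ht : (PySem.Str.join "" ((file.map PySem.Str.strip).take i)) = String.ofList (pvStrips (file.take i)) := by
    rw [← List.map_take, ← pvContent_toList, String.ofList_toList]
  have hc : (PySem.Str.join "" ((file.map PySem.Str.strip).drop i)) = String.ofList (pvStrips (file.drop i)) := by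
    rw [← List.map_drop, ← pvContent_toList, String.ofList_toList]
  simp [ht, hc]
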